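-- pv_equiv track=rewrite | github.com/MrBrantCode/unitest_baseline | mut_generate/mist_train_cf/cf_79640/solution.py | find_rarest_element
-- ===== SOURCE A (Python) =====
-- def find_rarest_element(input_list):
--     if not input_list:
--         return None
--     count_dict = {}
--     for elem in input_list:
--         if elem in count_dict:
--             count_dict[elem] += 1
--         else:
--             count_dict[elem] = 1
--     min_count = min(count_dict.values())
--     rarest_elements = [k for k, v in count_dict.items() if v == min_count]
--     return rarest_elements
-- ===== SOURCE B (Python) =====
-- def find_rarest_element(input_list):
--     if not input_list:
--         return None
--     counts = {}
--     for elem in input_list: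
--         counts[elem] = counts.get(elem, 0) + 1
--     # invert: frequency -> list of elements with that frequency (first-appearance order)
--     groups = {}
--     for elem, c in counts.items():
--         groups.setdefault(c, []).append(elem)
--     return groups[min(groups)]
-- ===== Notes on version B (the rewrite author's own statement) =====
-- stated objective: alternative
-- what changed: B inverts the frequency dict into buckets keyed by count and returns the minimum-frequency bucket by lookup, instead of A's min-over-values followed by a filtering rescan of the items.
import Mathlib
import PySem

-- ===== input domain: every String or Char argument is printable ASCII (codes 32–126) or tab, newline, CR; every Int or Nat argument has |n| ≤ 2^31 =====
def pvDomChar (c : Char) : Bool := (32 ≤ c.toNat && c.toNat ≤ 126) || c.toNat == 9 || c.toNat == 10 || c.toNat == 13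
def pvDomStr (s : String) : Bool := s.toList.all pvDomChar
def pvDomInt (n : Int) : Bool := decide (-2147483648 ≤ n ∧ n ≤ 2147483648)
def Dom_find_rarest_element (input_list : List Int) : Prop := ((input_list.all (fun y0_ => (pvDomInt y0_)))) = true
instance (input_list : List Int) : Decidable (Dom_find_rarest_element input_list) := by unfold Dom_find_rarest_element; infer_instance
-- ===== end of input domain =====

-- B replaces A's min-over-values + filtering rescan by inverting the count dict
-- into frequency buckets and returning the minimum-frequency bucket (alternative decomposition).


-- ===== PORT A =====
def find_rarest_element (input_list : List Int) : Option (List Int) :=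
  if input_list = [] then none
  else
    let count_dict : PySem.Dict Int Int :=
      input_list.foldl (fun d elem =>
        if d.contains elem then d.insert elem (d.getD elem 0 + 1)
        else d.insert elem 1) PySem.Dict.empty
    match PySem.List.min? count_dict.values (fun v => v) with
    | none => none  -- unreachable: count_dict is nonempty
    | some min_count =>
        some ((count_dict.items.filter (fun p => p.2 == min_count)).map (fun p => p.1))

-- ===== PORT B =====
def find_rarest_element_alt (input_list : List Int) : Option (List Int) :=
  if input_list = [] then none
  else
    let counts : PySem.Dict Int Int :=
      input_list.foldl (fun d elem => d.insert elem (d.getD elem 0 + 1)) PySem.Dict.empty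
    let groups : PySem.Dict Int (List Int) :=
      counts.items.foldl (fun g p => g.insert p.2 (g.getD p.2 [] ++ [p.1])) PySem.Dict.empty
    match PySem.List.min? groups.keys (fun v => v) with
    | none => none  -- unreachable: groups is nonempty
    | some m => groups.get? m

-- ===== PRECONDITION & SPEC =====
def Spec_find_rarest_element (input_list : List Int) (out : Option (List Int)) : Prop := out = find_rarest_element_alt input_list
instance (input_list : List Int) (out : Option (List Int)) : Decidable (Spec_find_rarest_element input_list out) := by unfold Spec_find_rarest_element; infer_instance

-- ===== CLAIM (what is proved, stated in full; the proofs are below) =====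
def Claim_equal_find_rarest_element : Prop := ∀ (input_list : List Int), Dom_find_rarest_element input_list → Spec_find_rarest_element input_list (find_rarest_element input_list)

-- ===== LEMMAS AND PROOFS =====

-- the two count-building loops produce the same dict
theorem counts_eq (input_list : List Int) :
    input_list.foldl (fun d elem =>
        if d.contains elem then d.insert elem (d.getD elem 0 + 1)
        else d.insert elem 1) PySem.Dict.empty
    = input_list.foldl (fun (d : PySem.Dict Int Int) elem => d.insert elem (d.getD elem 0 + 1)) PySem.Dict.empty := by
  have h : ∀ (d : PySem.Dict Int Int) (elem : Int),
      (if d.contains elem then d.insert elem (d.getD elem 0 + 1) else d.insert elem 1)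
      = d.insert elem (d.getD elem 0 + 1) := by
    intro d elem
    by_cases hc : d.contains elem = true
    · simp [hc]
    · simp only [Bool.not_eq_true] at hc
      simp [hc, PySem.Dict.getD_of_not_contains d 0 hc]
  exact congrArg (fun f => List.foldl f PySem.Dict.empty input_list) (funext fun d => funext fun e => h d e)

-- the bucket of the inverse map at c collects exactly the items with count c, in order
theorem bucket_getD (items : List (Int × Int)) (g : PySem.Dict Int (List Int)) (c : Int) :
    (items.foldl (fun g p => g.insert p.2 (g.getD p.2 [] ++ [p.1])) g).getD c []
    = g.getD c [] ++ (items.filter (fun p => p.2 == c)).map (fun p => p.1) := by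
  induction items generalizing g with
  | nil => simp
  | cons p rest ih =>
    simp only [List.foldl_cons, ih, List.filter_cons]
    by_cases hc : p.2 = c
    · subst hc
      simp
    · rw [PySem.Dict.getD_insert]
      simp [Ne.symm hc, hc]

theorem bucket_keys (items : List (Int × Int)) :
    (items.foldl (fun (g : PySem.Dict Int (List Int)) p => g.insert p.2 (g.getD p.2 [] ++ [p.1])) PySem.Dict.empty).keys
    = PySem.Set.ofList (items.map (fun p => p.2)) := by
  have := PySem.Dict.keys_foldl_insert_key (l := items) (key := fun p => p.2)
    (f := fun (g : PySem.Dict Int (List Int)) p => g.getD p.2 [] ++ [p.1]) (d := PySem.Dict.empty)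
  simpa [PySem.Set.update, PySem.Set.ofList_eq_foldl] using this

-- get? at a contained key returns the getD value
theorem get?_eq_some_getD {κ ν : Type} [BEq κ] (d : PySem.Dict κ ν) (k : κ) (d0 : ν)
    (h : d.contains k = true) : d.get? k = some (d.getD k d0) := by
  rw [PySem.Dict.contains_eq_isSome_get?] at h
  rw [PySem.Dict.getD_eq_get?_getD]
  cases hg : d.get? k with
  | none => rw [hg] at h; simp at h
  | some v => simp_all

theorem find_rarest_element_eq_alt (input_list : List Int) :
    find_rarest_element input_list = find_rarest_element_alt input_list := by
  unfold find_rarest_element find_rarest_element_alt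
  by_cases hnil : input_list = []
  · simp [hnil]
  · simp only [if_neg hnil]
    rw [counts_eq]
    set counts := input_list.foldl (fun (d : PySem.Dict Int Int) elem => d.insert elem (d.getD elem 0 + 1)) PySem.Dict.empty with hcounts
    set groups := counts.items.foldl (fun (g : PySem.Dict Int (List Int)) p => g.insert p.2 (g.getD p.2 [] ++ [p.1])) PySem.Dict.empty with hgroups
    -- keys of groups = distinct values of counts
    have hk : groups.keys = PySem.Set.ofList counts.values := by
      rw [hgroups, bucket_keys]; rfl
    -- counts is nonempty
    have hkeys : counts.keys = PySem.Set.ofList input_list := by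
      rw [hcounts]
      have := PySem.Dict.keys_foldl_insert (l := input_list)
        (f := fun (d : PySem.Dict Int Int) elem => d.getD elem 0 + 1) (d := PySem.Dict.empty)
      simpa [PySem.Set.update, PySem.Set.ofList_eq_foldl] using this
    have hvne : counts.values ≠ [] := by
      intro hv
      have h1 : counts.keys = [] := by
        have : counts.items = [] := by
          have := congrArg List.length hv
          simp [PySem.Dict.values] at this
          simpa [PySem.Dict.items] using this
        simp [PySem.Dict.keys, this]
      rw [hkeys] at h1
      rcases List.exists_cons_of_ne_nil hnil with ⟨x, xs, rfl⟩
      have : x ∈ PySem.Set.ofList (x :: xs) := by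
        rw [PySem.Set.mem_ofList]; exact List.mem_cons_self
      rw [h1] at this; simp at this
    -- both minima exist and are equal
    cases hma : PySem.List.min? counts.values (fun v => v) with
    | none => exact absurd ((PySem.List.min?_eq_none_iff _ _).mp hma) hvne
    | some ma =>
      cases hmb : PySem.List.min? groups.keys (fun v => v) with
      | none =>
        rw [PySem.List.min?_eq_none_iff, hk] at hmb
        have : ma ∈ counts.values := PySem.List.min?_mem hma
        rw [← PySem.Set.mem_ofList (xs := counts.values), hmb] at this
        simp at this
      | some mb =>
        have hmem : ∀ x : Int, x ∈ groups.keys ↔ x ∈ counts.values := by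
          intro x; rw [hk, PySem.Set.mem_ofList]
        have hab : ma = mb := by
          have h1 : mb ≤ ma :=
            PySem.List.min?_isMin hmb ma ((hmem ma).mpr (PySem.List.min?_mem hma))
          have h2 : ma ≤ mb :=
            PySem.List.min?_isMin hma mb ((hmem mb).mp (PySem.List.min?_mem hmb))
          omega
        subst hab
        -- groups.get? ma = some (bucket) = some (A's filtered list)
        have hcont : groups.contains ma = true := by
          rw [PySem.Dict.contains_iff_mem_keys]
          exact (hmem ma).mpr (PySem.List.min?_mem hma)
        have hget : groups.get? ma
            = some ((counts.items.filter (fun p => p.2 == ma)).map (fun p => p.1)) := by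
          rw [get?_eq_some_getD groups ma [] hcont, hgroups, bucket_getD]
          simp
        simp [hget]

-- ===== VERDICT (by name: the statement is the Claim_ definition above) =====
theorem find_rarest_element_spec : Claim_equal_find_rarest_element := by
  intro input_list _
  unfold Spec_find_rarest_element
  exact find_rarest_element_eq_alt input_list
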